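-- pv_equiv track=rewrite | github.com/nthokar/Math | hacker.py | ttt
-- ===== SOURCE A (Python) =====
-- from typing import List
--
-- def ttt(table: List[dict], depth: int) -> List[tuple]:
--     result = []
--     if depth >= len(table):
--         return [('', 0)]
--     place = table[depth]
--     for letter in place:
--         sub = ttt(table, depth+1)
--         for sub_word in sub:
--             result.append((letter[0] + sub_word[0], sub_word[1] + letter[1]))
--     return result
-- ===== SOURCE B (Python) =====
-- from typing import List
--
-- def ttt(table: List[dict], depth: int) -> List[tuple]:
--     # Iterative back-to-front fold: each row's product is computed once per depth
--     # instead of once per letter of the row above.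
--     acc = [('', 0)]
--     for i in reversed(range(depth, len(table))):
--         row = table[i]
--         acc = [(letter[0] + word, weight + letter[1]) for letter in row for (word, weight) in acc]
--     return acc
-- ===== Notes on version B (the rewrite author's own statement) =====
-- stated objective: alternative
-- what changed: Replaces A's recursion, which recomputes the whole subtree product once per letter of each row, with a single iterative back-to-front fold over the rows from depth on, building each level's product exactly once (trades recursion for iteration; avoids redundant subtree recomputation, though a timing run's inputs showed no measured speed-up).
import Mathlib
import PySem

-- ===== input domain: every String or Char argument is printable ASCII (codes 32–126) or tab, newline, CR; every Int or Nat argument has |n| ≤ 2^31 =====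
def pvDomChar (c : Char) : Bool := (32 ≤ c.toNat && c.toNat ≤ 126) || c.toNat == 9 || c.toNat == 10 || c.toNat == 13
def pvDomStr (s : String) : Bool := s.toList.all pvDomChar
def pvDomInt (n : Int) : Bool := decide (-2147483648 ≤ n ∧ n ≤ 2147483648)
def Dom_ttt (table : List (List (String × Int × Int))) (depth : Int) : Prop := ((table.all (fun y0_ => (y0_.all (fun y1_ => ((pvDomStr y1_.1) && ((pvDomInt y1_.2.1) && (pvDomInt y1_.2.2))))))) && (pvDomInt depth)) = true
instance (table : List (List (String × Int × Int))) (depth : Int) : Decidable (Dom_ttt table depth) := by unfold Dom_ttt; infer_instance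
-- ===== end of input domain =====

-- B replaces A's recursion (which re-computes the whole subtree once per letter) by a single
-- back-to-front iterative fold over the rows from `depth` on, computing each level once: same values.

-- ===== PORT A =====
-- Literal port of A; the recursion on `depth` is made total with a fuel counter
-- (fuel = (len - depth).toNat in the wrapper, never exhausted: it only guards totality).
def tttGo (table : List (List (String × Int × Int))) (fuel : Nat) (depth : Int) : List (String × Int) :=
  if (table.length : Int) ≤ depth then [("", 0)]
  else
    match fuel with
    | 0 => [("", 0)]  -- unreachable when fuel = (len - depth).toNat (then depth < len forces fuel > 0)
    | f + 1 =>
      let place := (PySem.List.pyGet? table depth).getD []  -- table[depth]; none (IndexError) excluded by Pre_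
      place.foldl
        (fun result letter =>
          let sub := tttGo table f (depth + 1)
          sub.foldl (fun r sw => r ++ [(letter.1 ++ sw.1, sw.2 + letter.2.1)]) result)
        []

def ttt (table : List (List (String × Int × Int))) (depth : Int) : List (String × Int) :=
  tttGo table ((table.length : Int) - depth).toNat depth

-- ===== PORT B =====
def ttt_alt (table : List (List (String × Int × Int))) (depth : Int) : List (String × Int) :=
  ((PySem.List.pyRange depth (table.length : Int) 1).reverse).foldl
    (fun acc i =>
      let row := (PySem.List.pyGet? table i).getD []  -- table[i]; none (IndexError) excluded by Pre_
      row.flatMap (fun letter => acc.map (fun p => (letter.1 ++ p.1, p.2 + letter.2.1))))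
    [("", 0)]

-- ===== PRECONDITION & SPEC =====
-- A raises IndexError exactly when depth < -len(table) (negative indexing past the front);
-- B raises there too. Pre_ admits every input on which A returns.
def Pre_ttt (table : List (List (String × Int × Int))) (depth : Int) : Prop :=
  -(table.length : Int) ≤ depth
instance (table : List (List (String × Int × Int))) (depth : Int) : Decidable (Pre_ttt table depth) := by unfold Pre_ttt; infer_instance

def pvWitness_ttt : (List (List (String × Int × Int))) × Int :=
  ([[("a", 1, 0), ("b", 2, 0)], [("c", 3, 0)]], 0)

def Spec_ttt (table : List (List (String × Int × Int))) (depth : Int) (out : List (String × Int)) : Prop := out = ttt_alt table depth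
instance (table : List (List (String × Int × Int))) (depth : Int) (out : List (String × Int)) : Decidable (Spec_ttt table depth out) := by unfold Spec_ttt; infer_instance

-- ===== CLAIM (what is proved, stated in full; the proofs are below) =====
def Claim_equal_ttt : Prop := ∀ (table : List (List (String × Int × Int))) (depth : Int), Dom_ttt table depth → Pre_ttt table depth → Spec_ttt table depth (ttt table depth)

-- ===== LEMMAS AND PROOFS =====

-- B's fold, peeled at the front of the range: ttt_alt satisfies A's one-level recurrence.
theorem ttt_alt_of_le (table : List (List (String × Int × Int))) (depth : Int)
    (h : (table.length : Int) ≤ depth) : ttt_alt table depth = [("", 0)] := by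
  unfold ttt_alt
  rw [PySem.List.pyRange_one_eq_nil h]
  rfl

theorem ttt_alt_step (table : List (List (String × Int × Int))) (depth : Int)
    (h : depth < (table.length : Int)) :
    ttt_alt table depth =
      ((PySem.List.pyGet? table depth).getD []).flatMap
        (fun letter => (ttt_alt table (depth + 1)).map
          (fun p => (letter.1 ++ p.1, p.2 + letter.2.1))) := by
  unfold ttt_alt
  rw [PySem.List.pyRange_one_cons h, List.reverse_cons, List.foldl_append]
  rfl

theorem tttGo_eq_alt (table : List (List (String × Int × Int))) (fuel : Nat) :
    ∀ depth : Int, ((table.length : Int) - depth).toNat ≤ fuel →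
      tttGo table fuel depth = ttt_alt table depth := by
  induction fuel with
  | zero =>
    intro depth hf
    have h : (table.length : Int) ≤ depth := by omega
    rw [ttt_alt_of_le table depth h]
    unfold tttGo
    simp [h]
  | succ f ih =>
    intro depth hf
    by_cases h : (table.length : Int) ≤ depth
    · rw [ttt_alt_of_le table depth h]
      unfold tttGo
      simp [h]
    · have hlt : depth < (table.length : Int) := by omega
      have hsub : tttGo table f (depth + 1) = ttt_alt table (depth + 1) := ih _ (by omega)
      rw [ttt_alt_step table depth hlt]
      unfold tttGo
      simp only [h, if_false]
      rw [hsub]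
      -- the nested append-folds equal flatMap ∘ map, built up from the front
      generalize (PySem.List.pyGet? table depth).getD [] = place
      generalize ttt_alt table (depth + 1) = sub
      suffices H : ∀ (acc : List (String × Int)),
          place.foldl (fun result letter =>
            sub.foldl (fun r sw => r ++ [(letter.1 ++ sw.1, sw.2 + letter.2.1)]) result) acc
          = acc ++ place.flatMap (fun letter => sub.map (fun p => (letter.1 ++ p.1, p.2 + letter.2.1))) by
        simpa using H []
      induction place with
      | nil => intro acc; simp
      | cons l rest ihp =>
        intro acc
        rw [List.foldl_cons, PySem.List.foldl_append_singleton_eq_map, ihp,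
          List.flatMap_cons, List.append_assoc]

-- ===== VERDICT (by name: the statement is the Claim_ definition above) =====
theorem ttt_spec : Claim_equal_ttt := by
  intro table depth _ _
  unfold Spec_ttt ttt
  exact tttGo_eq_alt table _ depth (le_refl _)
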